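-- pv_equiv track=rewrite | github.com/ATB-UQ/dihedral_fragments | src/dihedral_fragments/pattern_matching.py | sorted_components_list
-- ===== SOURCE A (Python) =====
-- from typing import List, Tuple, Sequence, Dict, Callable, Any, NamedTuple, Optional
-- from itertools import product, permutations, groupby
--
-- ON_SELF = lambda x: x
--
-- def sorted_components_list(component_list: List[str], permutation: Sequence[int]) -> List[str]:
--     sorting_dict = dict(
--         zip(
--             sorted(
--                 [
--                     key
--                     for (key, group) in groupby(
--                         sorted(component_list, key=ON_SELF),
--                         key=ON_SELF,
--                     )
--                 ],
--             ),
--             permutation,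
--         ),
--     )
--
--     return sorted(
--         component_list,
--         key=lambda x: sorting_dict[x],
--     )
-- ===== SOURCE B (Python) =====
-- def sorted_components_list(component_list, permutation):
--     # Rank each distinct component via the permutation, then bucket-sort:
--     # gather elements into per-rank buckets in input order and emit buckets
--     # in increasing rank order (equivalent to a stable sort by rank).
--     sorting_dict = dict(zip(sorted(set(component_list)), permutation))
--     buckets = {}
--     for x in component_list:
--         buckets.setdefault(sorting_dict[x], []).append(x)
--     out = []
--     for v in sorted(buckets):
--         out.extend(buckets[v])
--     return out
-- ===== Notes on version B (the rewrite author's own statement) =====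
-- stated objective: alternative
-- what changed: Replaces the stable comparison sort keyed by dict lookups over the whole list with a single-pass bucket grouping by rank followed by one sort over the distinct ranks only; unique keys come from set() instead of groupby over a pre-sorted copy.
import Mathlib
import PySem

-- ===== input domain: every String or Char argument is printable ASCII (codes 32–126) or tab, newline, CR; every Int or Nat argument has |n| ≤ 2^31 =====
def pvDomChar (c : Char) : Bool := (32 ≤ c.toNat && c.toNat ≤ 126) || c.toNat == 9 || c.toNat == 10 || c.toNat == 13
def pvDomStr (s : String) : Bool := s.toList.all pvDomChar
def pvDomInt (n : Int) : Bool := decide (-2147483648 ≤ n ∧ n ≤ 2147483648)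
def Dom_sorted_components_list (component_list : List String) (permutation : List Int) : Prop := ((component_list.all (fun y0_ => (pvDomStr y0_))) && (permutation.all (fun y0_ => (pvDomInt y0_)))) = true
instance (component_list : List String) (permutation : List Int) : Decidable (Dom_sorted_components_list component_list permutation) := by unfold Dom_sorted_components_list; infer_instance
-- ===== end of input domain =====

-- B replaces A's stable sort of the whole list (keyed by dict lookups) with bucket grouping
-- by rank plus one sort of the distinct ranks; equal return value proved on Pre_.

-- ===== PORT A =====
-- keys of itertools.groupby(l, key=identity): first element of each maximal run of equal elements
def pvGroupbyKeys (l : List String) : List String :=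
  match l with
  | [] => []
  | x :: t => x :: pvGroupbyKeys (t.dropWhile (· == x))
termination_by l.length
decreasing_by
  simpa using Nat.lt_succ_of_le (List.length_dropWhile_le _ _)

-- literal port of A: sorted unique keys (groupby over a sorted copy, sorted again),
-- zipped with `permutation` into a dict, then a stable sort of the list by dict lookup.
-- `Dict.getD … 0` is the dict lookup `sorting_dict[x]`: under Pre_ every lookup succeeds,
-- and where Python would raise KeyError the input is excluded by Pre_.
def sorted_components_list (component_list : List String) (permutation : List Int) : List String :=
  let uniq := pvGroupbyKeys (PySem.List.sorted component_list (fun x => x) false)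
  let skeys := PySem.List.sorted uniq (fun x => x) false
  let sorting_dict := PySem.Dict.ofList (skeys.zip permutation)
  PySem.List.sorted component_list (fun x => sorting_dict.getD x 0) false

-- ===== PORT B =====
-- literal port of B: set → sorted distinct keys → dict; one pass appending each element to the
-- bucket of its rank (setdefault/append = modify with default []); emit buckets in rank order.
def sorted_components_list_alt (component_list : List String) (permutation : List Int) : List String :=
  let sorting_dict := PySem.Dict.ofList
    ((PySem.List.sorted (PySem.Set.ofList component_list) (fun x => x) false).zip permutation)
  let buckets := component_list.foldl
    (fun b x => b.modify (sorting_dict.getD x 0) ([] : List String) (fun acc => acc ++ [x]))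
    PySem.Dict.empty
  (PySem.List.sorted buckets.keys (fun v => v) false).foldl
    (fun out v => out ++ buckets.getD v []) []

-- ===== PRECONDITION & SPEC =====
-- Pre_ excludes exactly the inputs where Python A raises KeyError: fewer permutation ranks
-- than distinct components (dict(zip(..)) truncates, so some component has no rank).
def Pre_sorted_components_list (component_list : List String) (permutation : List Int) : Prop :=
  (PySem.Set.ofList component_list).length ≤ permutation.length
instance (component_list : List String) (permutation : List Int) : Decidable (Pre_sorted_components_list component_list permutation) := by unfold Pre_sorted_components_list; infer_instance

def pvWitness_sorted_components_list : List String × List Int := (["b", "a", "b"], [1, 0])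

def Spec_sorted_components_list (component_list : List String) (permutation : List Int) (out : List String) : Prop := out = sorted_components_list_alt component_list permutation
instance (component_list : List String) (permutation : List Int) (out : List String) : Decidable (Spec_sorted_components_list component_list permutation out) := by unfold Spec_sorted_components_list; infer_instance

-- ===== CLAIM (what is proved, stated in full; the proofs are below) =====
def Claim_equal_sorted_components_list : Prop := ∀ (component_list : List String) (permutation : List Int), Dom_sorted_components_list component_list permutation → Pre_sorted_components_list component_list permutation → Spec_sorted_components_list component_list permutation (sorted_components_list component_list permutation)

-- ===== LEMMAS AND PROOFS =====

-- insertBy passes over a prefix it does not go before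
theorem pv_insertBy_append {α : Type} (before : α → α → Bool) (x : α) (l₁ l₂ : List α)
    (h : ∀ y ∈ l₁, before x y = false) :
    PySem.List.insertBy before x (l₁ ++ l₂) = l₁ ++ PySem.List.insertBy before x l₂ := by
  induction l₁ with
  | nil => simp
  | cons y t ih =>
      simp only [List.cons_append, PySem.List.insertBy]
      rw [h y (by simp)]
      simp only [Bool.false_eq_true, if_false]
      exact congrArg (y :: ·) (ih (fun z hz => h z (by simp [hz])))

-- insertBy goes in front when it goes before everything
theorem pv_insertBy_front {α : Type} (before : α → α → Bool) (x : α) (l : List α)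
    (h : ∀ y ∈ l, before x y = true) :
    PySem.List.insertBy before x l = x :: l := by
  cases l with
  | nil => rfl
  | cons y t => simp [PySem.List.insertBy, h y (by simp)]

-- a stable sort is the concatenation, over a strictly increasing list V covering all key
-- values, of the key-value buckets in input order
theorem pv_sorted_eq_flatMap (xs : List String) (key : String → Int) (V : List Int)
    (hV : V.Pairwise (· < ·)) (hcov : ∀ x ∈ xs, key x ∈ V) :
    PySem.List.sorted xs key false = V.flatMap (fun v => xs.filter (fun x => key x == v)) := by
  induction xs using List.reverseRecOn with
  | nil => simp [PySem.List.sorted]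
  | append_singleton xs x ih =>
      have hs : PySem.List.sorted (xs ++ [x]) key false
          = PySem.List.insertBy (fun a b => decide (key a < key b)) x
              (PySem.List.sorted xs key false) := by
        rw [PySem.List.sorted_eq_foldl_insertBy, PySem.List.sorted_eq_foldl_insertBy,
          List.foldl_append]
        rfl
      rw [hs, ih (fun y hy => hcov y (by simp [hy]))]
      obtain ⟨V₁, V₂, hVeq⟩ := List.append_of_mem (hcov x (by simp))
      subst hVeq
      rw [List.pairwise_append] at hV
      obtain ⟨hV₁, hV₂', hcross⟩ := hV
      have hlt₁ : ∀ v ∈ V₁, v < key x := fun v hv => hcross v hv (key x) (by simp)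
      have hlt₂ : ∀ v ∈ V₂, key x < v := fun v hv => (List.pairwise_cons.mp hV₂').1 v hv
      have hmemg : ∀ (v : Int) (y : String), y ∈ xs.filter (fun z => key z == v) → key y = v := by
        intro v y hy
        simpa using (List.mem_filter.mp hy).2
      have hskip : ∀ y ∈ V₁.flatMap (fun v => xs.filter (fun z => key z == v))
            ++ xs.filter (fun z => key z == key x),
          (fun a b => decide (key a < key b)) x y = false := by
        intro y hy
        rcases List.mem_append.mp hy with hy | hy
        · obtain ⟨v, hv, hyv⟩ := List.mem_flatMap.mp hy
          have h1 := hmemg v y hyv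
          have h2 := hlt₁ v hv
          simp only [decide_eq_false_iff_not]
          omega
        · have h1 := hmemg (key x) y hy
          simp only [decide_eq_false_iff_not]
          omega
      have hfront : ∀ y ∈ V₂.flatMap (fun v => xs.filter (fun z => key z == v)),
          (fun a b => decide (key a < key b)) x y = true := by
        intro y hy
        obtain ⟨v, hv, hyv⟩ := List.mem_flatMap.mp hy
        have h1 := hmemg v y hyv
        have h2 := hlt₂ v hv
        simp only [decide_eq_true_eq]
        omega
      have hsplit : (V₁ ++ key x :: V₂).flatMap (fun v => xs.filter (fun z => key z == v))
          = (V₁.flatMap (fun v => xs.filter (fun z => key z == v))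
              ++ xs.filter (fun z => key z == key x))
            ++ V₂.flatMap (fun v => xs.filter (fun z => key z == v)) := by
        simp [List.flatMap_append]
      rw [hsplit, pv_insertBy_append _ _ _ _ hskip, pv_insertBy_front _ _ _ hfront]
      -- now compare with the flatMap over (xs ++ [x])
      have hfV₁ : ∀ v ∈ V₁, (xs ++ [x]).filter (fun z => key z == v)
          = xs.filter (fun z => key z == v) := by
        intro v hv
        have := hlt₁ v hv
        rw [List.filter_append]
        simp only [List.filter_cons, List.filter_nil]
        have hne : (key x == v) = false := by simp; omega
        simp [hne]
      have hfV₂ : ∀ v ∈ V₂, (xs ++ [x]).filter (fun z => key z == v)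
          = xs.filter (fun z => key z == v) := by
        intro v hv
        have := hlt₂ v hv
        rw [List.filter_append]
        simp only [List.filter_cons, List.filter_nil]
        have hne : (key x == v) = false := by simp; omega
        simp [hne]
      have hfx : (xs ++ [x]).filter (fun z => key z == key x)
          = xs.filter (fun z => key z == key x) ++ [x] := by
        rw [List.filter_append]
        simp
      have e₁ : List.flatMap (fun v => List.filter (fun y => key y == v) (xs ++ [x])) V₁
          = List.flatMap (fun v => List.filter (fun z => key z == v) xs) V₁ := by
        rw [List.flatMap_def, List.flatMap_def, List.map_congr_left hfV₁]
      have e₂ : List.flatMap (fun v => List.filter (fun y => key y == v) (xs ++ [x])) V₂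
          = List.flatMap (fun v => List.filter (fun z => key z == v) xs) V₂ := by
        rw [List.flatMap_def, List.flatMap_def, List.map_congr_left hfV₂]
      rw [List.flatMap_append, List.flatMap_cons, hfx, e₁, e₂]
      simp

-- membership in groupby keys is membership in the list
theorem pv_mem_groupbyKeys (l : List String) (y : String) :
    y ∈ pvGroupbyKeys l ↔ y ∈ l := by
  induction l using pvGroupbyKeys.induct with
  | case1 => simp [pvGroupbyKeys]
  | case2 x t ih =>
      rw [pvGroupbyKeys]
      constructor
      · intro hy
        rcases List.mem_cons.mp hy with rfl | hy
        · simp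
        · exact List.mem_cons_of_mem x ((t.dropWhile_sublist (· == x)).mem (ih.mp hy))
      · intro hy
        rcases List.mem_cons.mp hy with rfl | hy
        · simp
        · rw [← List.takeWhile_append_dropWhile (p := (· == x)) (l := t)] at hy
          rcases List.mem_append.mp hy with hy | hy
          · have := List.mem_takeWhile_imp hy
            simp at this
            simp [this]
          · exact List.mem_cons_of_mem x (ih.mpr hy)

-- on a nondecreasing list the groupby keys are distinct
theorem pv_nodup_groupbyKeys (l : List String) (h : l.Pairwise (· ≤ ·)) :
    (pvGroupbyKeys l).Nodup := by
  induction l using pvGroupbyKeys.induct with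
  | case1 => simp [pvGroupbyKeys]
  | case2 x t ih =>
      rw [pvGroupbyKeys]
      have hpt : (t.dropWhile (· == x)).Pairwise (· ≤ ·) :=
        (List.pairwise_cons.mp h).2.sublist (t.dropWhile_sublist (· == x))
      refine List.nodup_cons.mpr ⟨fun hx => ?_, ih hpt⟩
      have hx' : x ∈ t.dropWhile (· == x) := (pv_mem_groupbyKeys _ x).mp hx
      cases hd : t.dropWhile (· == x) with
      | nil => rw [hd] at hx'; simp at hx'
      | cons a tl =>
          have hne : (a == x) = false := by
            have := List.head?_dropWhile_not (· == x) t
            rw [hd] at this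
            simpa using this
          rw [hd] at hx' hpt
          have hax : a ≤ x := by
            rcases List.mem_cons.mp hx' with rfl | hx'
            · exact le_refl x
            · exact (List.pairwise_cons.mp hpt).1 x hx'
          have hxa : x ≤ a := (List.pairwise_cons.mp h).1 a
            ((t.dropWhile_sublist (· == x)).mem (by rw [hd]; simp))
          have : a = x := le_antisymm hax hxa
          simp [this] at hne

-- A's sorted unique keys = B's sorted unique keys
theorem pv_keys_eq (cl : List String) :
    PySem.List.sorted (pvGroupbyKeys (PySem.List.sorted cl (fun x => x) false)) (fun x => x) false
      = PySem.List.sorted (PySem.Set.ofList cl) (fun x => x) false := by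
  apply PySem.List.sorted_eq_sorted_of_perm _ _ _ (fun a b hab => hab)
  apply (List.perm_ext_iff_of_nodup ?_ (PySem.Set.nodup_ofList cl)).mpr
  · intro y
    rw [pv_mem_groupbyKeys, PySem.List.mem_sorted, PySem.Set.mem_ofList]
  · exact pv_nodup_groupbyKeys _
      (by simpa using PySem.List.sorted_pairwise cl (fun x => x))

-- ===== VERDICT (by name: the statement is the Claim_ definition above) =====
theorem sorted_components_list_spec : Claim_equal_sorted_components_list := by
  intro cl perm _ _
  show _ = _
  simp only [sorted_components_list, sorted_components_list_alt]
  rw [pv_keys_eq]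
  set d := PySem.Dict.ofList
    ((PySem.List.sorted (PySem.Set.ofList cl) (fun x => x) false).zip perm) with hd
  set key : String → Int := fun x => d.getD x 0 with hkey
  -- B side: buckets
  set buckets := cl.foldl
    (fun b x => b.modify (key x) ([] : List String) (fun acc => acc ++ [x]))
    PySem.Dict.empty with hbuckets
  have hkeys : buckets.keys = PySem.Set.ofList (cl.map key) := by
    rw [hbuckets, PySem.Dict.keys_foldl_modify_key cl key ([] : List String)
      (fun _ x acc => acc ++ [x]) PySem.Dict.empty]
    simp [PySem.Dict.keys_empty, PySem.Set.update, PySem.Set.ofList]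
  have hgetD : ∀ v : Int, buckets.getD v [] = cl.filter (fun x => key x == v) := by
    intro v
    have h := PySem.Dict.getD_foldl_modify_append (cl.map (fun x => (key x, x)))
      (PySem.Dict.empty : PySem.Dict Int (List String)) v
    rw [List.foldl_map] at h
    simp only [PySem.Dict.getD_empty, List.nil_append, List.filter_map,
      Function.comp_def, List.map_map] at h
    rw [hbuckets]
    simpa using h
  rw [PySem.List.foldl_append_eq_flatMap, hkeys]
  have h1 : (PySem.List.sorted (PySem.Set.ofList (cl.map key)) (fun v => v) false).Pairwise (fun a b => a ≤ b) := by
    have := PySem.List.sorted_pairwise (PySem.Set.ofList (cl.map key)) (fun v : Int => v)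
    simpa using this
  have h2 : (PySem.List.sorted (PySem.Set.ofList (cl.map key)) (fun v => v) false).Nodup :=
    (PySem.List.sorted_perm (PySem.Set.ofList (cl.map key)) (fun v : Int => v) false).symm.nodup (PySem.Set.nodup_ofList _)
  have hV : (PySem.List.sorted (PySem.Set.ofList (cl.map key)) (fun v => v) false).Pairwise (fun a b => a < b) := by
    refine (h1.and h2).imp ?_
    intro a b hab
    exact lt_of_le_of_ne hab.1 hab.2
  have hcov : ∀ x ∈ cl, key x ∈ PySem.List.sorted (PySem.Set.ofList (cl.map key)) (fun v => v) false := by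
    intro x hx
    rw [PySem.List.mem_sorted, PySem.Set.mem_ofList]
    exact List.mem_map_of_mem hx
  rw [pv_sorted_eq_flatMap cl key _ hV hcov]
  simp only [List.nil_append]
  have hfin : List.flatMap (fun v => buckets.getD v [])
        (PySem.List.sorted (PySem.Set.ofList (cl.map key)) (fun v => v) false)
      = List.flatMap (fun v => cl.filter (fun x => key x == v))
        (PySem.List.sorted (PySem.Set.ofList (cl.map key)) (fun v => v) false) := by
    rw [List.flatMap_def, List.flatMap_def]
    exact congrArg List.flatten (List.map_congr_left (fun v _ => hgetD v))
  exact hfin.symm
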